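-- pv_equiv track=rewrite | github.com/bsdphk/PyReveng3 | pyreveng/pil.py | pil_lex
-- ===== SOURCE A (Python) =====
-- class PILSyntaxError(Exception):
--     pass
--
-- def pil_lex(t):
--     s = 0
--     l = []
--     for c in t:
--         if s == 1 and (c.isalnum() or c in ('%', '*', '_', '.', ':')):
--             w += c
--             continue
--         if s == 1:
--             l.append(w)
--             s = 0
--         if s == 0 and c.isspace():
--             continue
--         if s == 0 and c in (',', '=', '(', ')', '-', '+'):
--             l.append(c)
--             continue
--         if s == 0 and (c.isalnum() or c in ('%', '_', '.')):
--             s = 1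
--             w = c
--             continue
--         raise PILSyntaxError(
--             "PIL syntax error at '%s' state %d\n\t%s" % (c, s, t))
--     if s == 1:
--         l.append(w)
--     return l
-- ===== SOURCE B (Python) =====
-- class PILSyntaxError(Exception):
--     pass
--
-- def pil_lex(t):
--     l = []
--     i = 0
--     n = len(t)
--     while i < n:
--         c = t[i]
--         if c.isspace():
--             i += 1
--         elif c in (',', '=', '(', ')', '-', '+'):
--             l.append(c)
--             i += 1
--         elif c.isalnum() or c in ('%', '_', '.'):
--             j = i + 1
--             while j < n and (t[j].isalnum() or t[j] in ('%', '*', '_', '.', ':')):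
--                 j += 1
--             l.append(t[i:j])
--             i = j
--         else:
--             raise PILSyntaxError(
--                 "PIL syntax error at '%s' state %d\n\t%s" % (c, 0, t))
--     return l
-- ===== Notes on version B (the rewrite author's own statement) =====
-- stated objective: simpler
-- what changed: Replaced the character-at-a-time state machine (state flag plus pending-word variable with an end-of-loop flush) by an index-driven maximal-munch lexer that slices each word out in one inner scan, so no lexer state or trailing flush exists.
-- outside the precondition, e.g. on pil_lex('*'): A raises PILSyntaxError, B raises PILSyntaxError; on pil_lex(':'): A raises PILSyntaxError, B raises PILSyntaxError
import Mathlib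
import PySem

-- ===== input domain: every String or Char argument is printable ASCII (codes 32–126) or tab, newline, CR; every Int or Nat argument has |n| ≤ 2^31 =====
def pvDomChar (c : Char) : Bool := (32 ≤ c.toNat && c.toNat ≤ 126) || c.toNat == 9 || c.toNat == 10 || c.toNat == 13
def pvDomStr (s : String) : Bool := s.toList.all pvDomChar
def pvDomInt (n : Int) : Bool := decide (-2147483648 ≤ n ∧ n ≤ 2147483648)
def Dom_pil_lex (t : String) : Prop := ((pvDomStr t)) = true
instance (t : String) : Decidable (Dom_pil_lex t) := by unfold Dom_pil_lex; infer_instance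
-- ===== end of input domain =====

-- B replaces A's character-at-a-time state machine (state flag + pending word + end-of-input
-- flush) by a maximal-munch lexer that slices each word out in one inner scan; objective: simpler.
-- Where the Python raises PILSyntaxError (excluded by Pre_) nothing is claimed.

-- ===== PORT A =====
-- A's character classes (PySem.Chars.isalnum/isspace are Python-exact on the ASCII domain)
def pvPunct (c : Char) : Bool := c == ',' || c == '=' || c == '(' || c == ')' || c == '-' || c == '+'
def pvCont (c : Char) : Bool := PySem.Chars.isalnum c || c == '%' || c == '*' || c == '_' || c == '.' || c == ':'
def pvStart (c : Char) : Bool := PySem.Chars.isalnum c || c == '%' || c == '_' || c == '.'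

-- A's for-loop: state s (true = inside a word), pending word w, output l;
-- the [] case is the trailing 'if s == 1: l.append(w)'.  After the flush s is 0,
-- so Python's redundant 's == 0 and' guards on the remaining branches are omitted.
-- The final 'else' is 'raise PILSyntaxError' (outside Pre_): return the tokens so far.
def pilA : List Char → Bool → List Char → List String → List String
  | [], s, w, l => if s then l ++ [String.ofList w] else l
  | c :: cs, s, w, l =>
    if s && pvCont c then
      pilA cs s (w ++ [c]) l
    else
      let l' := if s then l ++ [String.ofList w] else l   -- 'if s == 1: l.append(w); s = 0'
      if PySem.Chars.isspace c then pilA cs false w l'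
      else if pvPunct c then pilA cs false w (l' ++ [String.ofList [c]])
      else if pvStart c then pilA cs true [c] l'
      else l'

def pil_lex (t : String) : List String := pilA t.toList false [] []

-- ===== PORT B =====
-- maximal-munch: skip whitespace, emit punctuation, or take a whole word in one inner scan
def pilB : List Char → List String
  | [] => []
  | c :: cs =>
    if PySem.Chars.isspace c then pilB cs
    else if pvPunct c then String.ofList [c] :: pilB cs
    else if pvStart c then
      String.ofList (c :: cs.takeWhile pvCont) :: pilB (cs.dropWhile pvCont)
    else []  -- raise PILSyntaxError (outside Pre_)
  termination_by cs => cs.length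
  decreasing_by
    · simp
    · simp
    · simpa using Nat.lt_succ_of_le (cs.length_dropWhile_le pvCont)

def pil_lex_alt (t : String) : List String := pilB t.toList

-- ===== PRECONDITION & SPEC =====
def pvExt (c : Char) : Bool := c == '*' || c == ':'
def pvOk (c : Char) : Bool := PySem.Chars.isspace c || pvPunct c || pvCont c

-- Pre_ excludes exactly the inputs on which A raises PILSyntaxError: a character outside every
-- class, or '*'/':' not immediately preceded by a word character (A accepts them only inside a word).
def Pre_pil_lex (t : String) : Prop :=
  t.toList.all pvOk = true ∧
  t.toList.head?.all (fun c => !pvExt c) = true ∧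
  (t.toList.zip t.toList.tail).all (fun p => !pvExt p.2 || pvCont p.1) = true
instance (t : String) : Decidable (Pre_pil_lex t) := by unfold Pre_pil_lex; infer_instance

def pvWitness_pil_lex : String := "a.b*2 ,"

def Spec_pil_lex (t : String) (out : List String) : Prop := out = pil_lex_alt t
instance (t : String) (out : List String) : Decidable (Spec_pil_lex t out) := by unfold Spec_pil_lex; infer_instance

-- ===== CLAIM (what is proved, stated in full; the proofs are below) =====
def Claim_equal_pil_lex : Prop := ∀ (t : String), Dom_pil_lex t → Pre_pil_lex t → Spec_pil_lex t (pil_lex t)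

-- ===== LEMMAS AND PROOFS =====

-- code-point view of Char equality (for omega)
theorem pvChEq (c d : Char) : (c = d) ↔ (c.toNat = d.toNat) :=
  ⟨fun h => by rw [h], fun h => Char.ext (UInt32.toNat_inj.mp h)⟩

-- character-class disjointness facts, by reduction to arithmetic on code points
theorem pvSpace_not_cont (c : Char) (h : PySem.Chars.isspace c = true) : pvCont c = false := by
  simp only [pvCont, PySem.Chars.isspace, PySem.Chars.isalnum, PySem.Chars.isalpha,
    PySem.Chars.isdigit, PySem.Chars.isupper, PySem.Chars.islower, Char.le_def] at *
  simp only [UInt32.le_iff_toNat_le] at *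
  simp [pvChEq] at *
  omega

theorem pvPunct_not_space_cont (c : Char) (h : pvPunct c = true) :
    PySem.Chars.isspace c = false ∧ pvCont c = false := by
  simp only [pvPunct, beq_iff_eq, Bool.or_eq_true] at h
  rcases h with ((((rfl | rfl) | rfl) | rfl) | rfl) | rfl <;> decide

theorem pvStart_not_space_punct (c : Char) (h : pvStart c = true) :
    PySem.Chars.isspace c = false ∧ pvPunct c = false := by
  simp only [pvStart, Bool.or_eq_true, beq_iff_eq] at h
  rcases h with ((ha | rfl) | rfl) | rfl
  · simp only [pvPunct, PySem.Chars.isspace, PySem.Chars.isalnum, PySem.Chars.isalpha,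
      PySem.Chars.isdigit, PySem.Chars.isupper, PySem.Chars.islower, Char.le_def] at *
    simp only [UInt32.le_iff_toNat_le] at *
    simp [pvChEq] at *
    omega
  all_goals decide

theorem pvCont_eq_start_or_ext (c : Char) :
    pvCont c = true ↔ (pvStart c = true ∨ pvExt c = true) := by
  simp [pvCont, pvStart, pvExt]; tauto

-- validity predicates the induction runs on (pvV1: A may be mid-word; pvV0: A is at state 0)
def pvV1 : List Char → Prop
  | [] => True
  | c :: cs => pvOk c = true ∧ (∀ d ∈ cs.head?, pvExt d = true → pvCont c = true) ∧ pvV1 cs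

def pvV0 (cs : List Char) : Prop := pvV1 cs ∧ (∀ c ∈ cs.head?, pvExt c = false)

theorem pvPre_V1 : ∀ cs : List Char, (∀ c ∈ cs, pvOk c = true) →
    (∀ p ∈ cs.zip cs.tail, pvExt p.2 = true → pvCont p.1 = true) → pvV1 cs := by
  intro cs
  induction cs with
  | nil => intro _ _; trivial
  | cons c cs ih =>
    intro hok hz
    refine ⟨hok c (by simp), ?_, ih (fun x hx => hok x (by simp [hx])) ?_⟩
    · intro d hd he
      cases cs with
      | nil => simp at hd
      | cons d' ds =>
        simp only [List.head?_cons, Option.mem_def, Option.some.injEq] at hd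
        exact hz (c, d') (by simp [List.zip_cons_cons]) (by rwa [hd])
    · cases cs with
      | nil => simp
      | cons d' ds =>
        intro p hp
        apply hz
        rw [List.tail_cons, List.zip_cons_cons]
        rw [List.tail_cons] at hp
        exact List.mem_cons_of_mem _ hp

theorem pvHead0 (c : Char) (cs : List Char) (hc : pvCont c = false)
    (hmid : ∀ d ∈ cs.head?, pvExt d = true → pvCont c = true) :
    ∀ d ∈ cs.head?, pvExt d = false := by
  intro d hd
  cases h : pvExt d with
  | false => rfl
  | true => rw [hmid d hd h] at hc; exact absurd hc (by simp)

-- the combined state-0 / state-1 loop invariant, by strong induction on the length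
theorem pvMain : ∀ n cs, cs.length ≤ n →
    (pvV0 cs → ∀ w l, pilA cs false w l = l ++ pilB cs) ∧
    (pvV1 cs → ∀ w l, pilA cs true w l =
      l ++ [String.ofList (w ++ cs.takeWhile pvCont)] ++ pilB (cs.dropWhile pvCont)) := by
  intro n
  induction n with
  | zero =>
    intro cs hcs
    have : cs = [] := List.eq_nil_of_length_eq_zero (Nat.le_zero.mp hcs)
    subst this
    exact ⟨fun _ w l => by simp [pilA, pilB], fun _ w l => by simp [pilA, pilB]⟩
  | succ n ih =>
    intro cs hcs
    cases cs with
    | nil => exact ⟨fun _ w l => by simp [pilA, pilB], fun _ w l => by simp [pilA, pilB]⟩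
    | cons c cs =>
      have hlen : cs.length ≤ n := Nat.le_of_succ_le_succ hcs
      constructor
      · -- state 0
        rintro ⟨⟨hokc, hmid, hV1cs⟩, hhd⟩ w l
        have hnotext : pvExt c = false := by simpa using hhd
        rcases (by simpa [pvOk] using hokc :
            (PySem.Chars.isspace c = true ∨ pvPunct c = true) ∨ pvCont c = true) with (hs | hp) | hcont
        · -- whitespace
          have hncont := pvSpace_not_cont c hs
          have hV0cs : pvV0 cs := ⟨hV1cs, pvHead0 c cs hncont hmid⟩
          simp only [pilA, Bool.false_and, Bool.false_eq_true, if_false, hs, if_true]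
          rw [(ih cs hlen).1 hV0cs w l, show pilB (c :: cs) = pilB cs from by
            rw [pilB.eq_def]; simp [hs]]
        · -- punctuation
          obtain ⟨hns, hncont⟩ := pvPunct_not_space_cont c hp
          have hV0cs : pvV0 cs := ⟨hV1cs, pvHead0 c cs hncont hmid⟩
          simp only [pilA, Bool.false_and, Bool.false_eq_true, if_false, hns, hp, if_true]
          rw [(ih cs hlen).1 hV0cs w (l ++ [String.ofList [c]]),
            show pilB (c :: cs) = String.ofList [c] :: pilB cs from by
              rw [pilB.eq_def]; simp [hns, hp]]
          simp
        · -- word start (a cont char at state 0 and not ext is a start char)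
          have hstart : pvStart c = true := by
            rcases (pvCont_eq_start_or_ext c).mp hcont with h | h
            · exact h
            · rw [h] at hnotext; exact absurd hnotext (by simp)
          obtain ⟨hns, hnp⟩ := pvStart_not_space_punct c hstart
          simp only [pilA, Bool.false_and, Bool.false_eq_true, if_false, hns, hnp, hstart, if_true]
          rw [(ih cs hlen).2 hV1cs [c] l,
            show pilB (c :: cs) =
                String.ofList (c :: cs.takeWhile pvCont) :: pilB (cs.dropWhile pvCont) from by
              rw [pilB.eq_def]; simp [hns, hnp, hstart]]
          simp
      · -- state 1
        rintro ⟨hokc, hmid, hV1cs⟩ w l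
        cases hcont : pvCont c with
        | true =>
          simp only [pilA, Bool.true_and, hcont, if_true]
          rw [(ih cs hlen).2 hV1cs (w ++ [c]) l]
          simp [List.takeWhile, List.dropWhile, hcont]
        | false =>
          -- flush the pending word, then c is handled as at state 0
          have htake : (c :: cs).takeWhile pvCont = [] := by simp [List.takeWhile, hcont]
          have hdrop : (c :: cs).dropWhile pvCont = c :: cs := by simp [List.dropWhile, hcont]
          rw [htake, hdrop]
          rcases (by simpa [pvOk] using hokc :
              (PySem.Chars.isspace c = true ∨ pvPunct c = true) ∨ pvCont c = true) with (hs | hp) | hc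
          · have hV0cs : pvV0 cs := ⟨hV1cs, pvHead0 c cs hcont hmid⟩
            simp only [pilA, Bool.true_and, hcont, Bool.false_eq_true, if_false, hs, if_true]
            rw [(ih cs hlen).1 hV0cs w (l ++ [String.ofList w]),
              show pilB (c :: cs) = pilB cs from by rw [pilB.eq_def]; simp [hs]]
            simp
          · obtain ⟨hns, _⟩ := pvPunct_not_space_cont c hp
            have hV0cs : pvV0 cs := ⟨hV1cs, pvHead0 c cs hcont hmid⟩
            simp only [pilA, Bool.true_and, hcont, Bool.false_eq_true, if_false, hns, hp, if_true]
            rw [(ih cs hlen).1 hV0cs w (l ++ [String.ofList w] ++ [String.ofList [c]]),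
              show pilB (c :: cs) = String.ofList [c] :: pilB cs from by
                rw [pilB.eq_def]; simp [hns, hp]]
            simp
          · rw [hc] at hcont; exact absurd hcont (by simp)

-- ===== VERDICT (by name: the statement is the Claim_ definition above) =====
theorem pil_lex_spec : Claim_equal_pil_lex := by
  intro t _ hpre
  obtain ⟨h1, h2, h3⟩ := hpre
  have h1' : ∀ c ∈ t.toList, pvOk c = true := List.all_eq_true.mp h1
  have h2' : ∀ c ∈ t.toList.head?, pvExt c = false := by
    intro c hc
    simp only [Option.mem_def] at hc
    rw [hc] at h2
    simpa using h2
  have h3' : ∀ p ∈ t.toList.zip t.toList.tail, pvExt p.2 = true → pvCont p.1 = true := by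
    intro p hp he
    have := List.all_eq_true.mp h3 p hp
    simpa [he] using this
  unfold Spec_pil_lex pil_lex pil_lex_alt
  have := (pvMain t.toList.length t.toList le_rfl).1 ⟨pvPre_V1 t.toList h1' h3', h2'⟩ [] []
  simpa using this
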